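-- pv_equiv track=rewrite | github.com/devnayyar/DataQuality_AgenticRulemaker | AGENTIC_DQ_VSCODE/profiling/pii_transformer.py | generate_pii_transformation_rules
-- ===== SOURCE A (Python) =====
-- from typing import Dict, List, Any
--
-- def generate_pii_transformation_rules(pii_fields: List[str]) -> List[str]:
--     """
--     Generate transformation rules for detected PII fields.
--
--     Args:
--         pii_fields: List of column names identified as PII
--
--     Returns:
--         List of transformation rule expressions
--     """
--     rules = []
--
--     for field in pii_fields:
--         field_lower = field.lower()
--
--         # Email transformation
--         if 'email' in field_lower or 'mail' in field_lower:
--             rules.append(f"df['{field}'] = df['{field}'].apply(lambda x: mask_email(x))")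
--
--         # Phone transformation
--         elif 'phone' in field_lower or 'tel' in field_lower or 'mobile' in field_lower:
--             rules.append(f"df['{field}'] = df['{field}'].apply(lambda x: mask_phone(x))")
--
--         # SSN/ID transformation
--         elif 'ssn' in field_lower or 'social' in field_lower or 'id_number' in field_lower:
--             rules.append(f"df['{field}'] = df['{field}'].apply(lambda x: mask_ssn(x))")
--
--         # Credit card transformation
--         elif 'credit' in field_lower or 'cc_' in field_lower or 'card' in field_lower:
--             rules.append(f"df['{field}'] = df['{field}'].apply(lambda x: mask_credit_card(x))")
--
--         # Name transformation (hash)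
--         elif 'name' in field_lower or 'fname' in field_lower or 'lname' in field_lower or 'first' in field_lower or 'last' in field_lower:
--             rules.append(f"df['{field}'] = df['{field}'].apply(lambda x: hash_name(x))")
--
--         # Address transformation (remove)
--         elif 'address' in field_lower or 'street' in field_lower or 'location' in field_lower:
--             rules.append(f"df['{field}'] = df['{field}'].apply(lambda x: remove_address(x))")
--
--         # Default: hash for unknown PII types
--         else:
--             rules.append(f"df['{field}'] = df['{field}'].apply(lambda x: hash_name(x))")
--
--     return rules
-- ===== SOURCE B (Python) =====
-- from typing import Dict, List, Any
--
-- # Inverted index: trigger substring -> priority (category). Instead of testing each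
-- # trigger against the field, enumerate every window of the lowercased field of a
-- # trigger length, look it up in the hash table, and keep the minimum priority seen.
-- # Priority 6 is the default (hash_name).
-- _PRIORITY: Dict[str, int] = {
--     "email": 0, "mail": 0,
--     "phone": 1, "tel": 1, "mobile": 1,
--     "ssn": 2, "social": 2, "id_number": 2,
--     "credit": 3, "cc_": 3, "card": 3,
--     "name": 4, "fname": 4, "lname": 4, "first": 4, "last": 4,
--     "address": 5, "street": 5, "location": 5,
-- }
-- _LENGTHS = (3, 4, 5, 6, 7, 8, 9)  # the distinct trigger lengths
-- _MASKS = ("mask_email", "mask_phone", "mask_ssn", "mask_credit_card",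
--           "hash_name", "remove_address", "hash_name")
--
--
-- def generate_pii_transformation_rules(pii_fields: List[str]) -> List[str]:
--     rules = []
--     for field in pii_fields:
--         fl = field.lower()
--         p = 6
--         for i in range(len(fl)):
--             for length in _LENGTHS:
--                 p = min(p, _PRIORITY.get(fl[i:i + length], 6))
--         rules.append(f"df['{field}'] = df['{field}'].apply(lambda x: {_MASKS[p]}(x))")
--     return rules
-- ===== Notes on version B (the rewrite author's own statement) =====
-- stated objective: alternative
-- what changed: Replaces A's six-way if/elif of per-trigger 'substring in field' tests by an inverted index: B enumerates every window of the lowercased field whose length is a trigger length, hashes it into a trigger->priority dict, keeps the minimum priority seen, and formats one shared rule string indexed by that priority.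
import Mathlib
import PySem

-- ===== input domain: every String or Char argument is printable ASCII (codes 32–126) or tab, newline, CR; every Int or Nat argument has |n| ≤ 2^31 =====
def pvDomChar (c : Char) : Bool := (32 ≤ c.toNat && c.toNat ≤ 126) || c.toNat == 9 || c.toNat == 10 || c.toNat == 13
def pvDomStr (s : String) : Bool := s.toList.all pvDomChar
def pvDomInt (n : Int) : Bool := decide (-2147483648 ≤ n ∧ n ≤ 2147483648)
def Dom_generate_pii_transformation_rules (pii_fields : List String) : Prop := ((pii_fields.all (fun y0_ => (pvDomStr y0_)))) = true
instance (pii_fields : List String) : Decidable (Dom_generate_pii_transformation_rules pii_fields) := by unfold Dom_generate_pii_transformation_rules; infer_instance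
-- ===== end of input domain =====

set_option maxHeartbeats 1000000


-- B replaces A's per-trigger substring tests (six-way if/elif) by an inverted index:
-- it enumerates every window of the lowercased field whose length is a trigger length,
-- hashes it into a trigger->priority table, and keeps the minimum priority (alternative algorithm).

-- ===== PORT A =====
def generate_pii_transformation_rules (pii_fields : List String) : List String :=
  pii_fields.foldl (fun rules field =>
    let field_lower := PySem.Str.lower field
    if PySem.Str.isIn "email" field_lower || PySem.Str.isIn "mail" field_lower then
      rules ++ ["df['" ++ field ++ "'] = df['" ++ field ++ "'].apply(lambda x: mask_email(x))"]
    else if PySem.Str.isIn "phone" field_lower || PySem.Str.isIn "tel" field_lower || PySem.Str.isIn "mobile" field_lower then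
      rules ++ ["df['" ++ field ++ "'] = df['" ++ field ++ "'].apply(lambda x: mask_phone(x))"]
    else if PySem.Str.isIn "ssn" field_lower || PySem.Str.isIn "social" field_lower || PySem.Str.isIn "id_number" field_lower then
      rules ++ ["df['" ++ field ++ "'] = df['" ++ field ++ "'].apply(lambda x: mask_ssn(x))"]
    else if PySem.Str.isIn "credit" field_lower || PySem.Str.isIn "cc_" field_lower || PySem.Str.isIn "card" field_lower then
      rules ++ ["df['" ++ field ++ "'] = df['" ++ field ++ "'].apply(lambda x: mask_credit_card(x))"]
    else if PySem.Str.isIn "name" field_lower || PySem.Str.isIn "fname" field_lower || PySem.Str.isIn "lname" field_lower || PySem.Str.isIn "first" field_lower || PySem.Str.isIn "last" field_lower then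
      rules ++ ["df['" ++ field ++ "'] = df['" ++ field ++ "'].apply(lambda x: hash_name(x))"]
    else if PySem.Str.isIn "address" field_lower || PySem.Str.isIn "street" field_lower || PySem.Str.isIn "location" field_lower then
      rules ++ ["df['" ++ field ++ "'] = df['" ++ field ++ "'].apply(lambda x: remove_address(x))"]
    else
      rules ++ ["df['" ++ field ++ "'] = df['" ++ field ++ "'].apply(lambda x: hash_name(x))"]) []

-- ===== PORT B =====
-- the module-level _PRIORITY dict of Source B (trigger substring -> category priority)
def pvPriority : PySem.Dict String Int :=
  PySem.Dict.ofList
    [("email", 0), ("mail", 0),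
     ("phone", 1), ("tel", 1), ("mobile", 1),
     ("ssn", 2), ("social", 2), ("id_number", 2),
     ("credit", 3), ("cc_", 3), ("card", 3),
     ("name", 4), ("fname", 4), ("lname", 4), ("first", 4), ("last", 4),
     ("address", 5), ("street", 5), ("location", 5)]

-- the _LENGTHS tuple of Source B (distinct trigger lengths)
def pvLengths : List Int := [3, 4, 5, 6, 7, 8, 9]

-- the _MASKS tuple of Source B (mask function per priority; 6 = default)
def pvMasks : List String :=
  ["mask_email", "mask_phone", "mask_ssn", "mask_credit_card",
   "hash_name", "remove_address", "hash_name"]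

-- the inner double loop of Source B: minimum priority over all trigger-length windows of fl
def pvBestP (fl : String) : Int :=
  (PySem.List.pyRange 0 (PySem.Str.len fl) 1).foldl (fun p i =>
    pvLengths.foldl (fun p length =>
      min p (pvPriority.getD (PySem.Str.slice fl (some i) (some (i + length))) 6)) p) 6

def generate_pii_transformation_rules_alt (pii_fields : List String) : List String :=
  pii_fields.foldl (fun rules field =>
    let p := pvBestP (PySem.Str.lower field)
    rules ++ ["df['" ++ field ++ "'] = df['" ++ field ++ "'].apply(lambda x: " ++
      (PySem.List.pyGetD pvMasks p "" ++ "(x))")]) []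

-- ===== PRECONDITION & SPEC =====
def Spec_generate_pii_transformation_rules (pii_fields : List String) (out : List String) : Prop := out = generate_pii_transformation_rules_alt pii_fields
instance (pii_fields : List String) (out : List String) : Decidable (Spec_generate_pii_transformation_rules pii_fields out) := by unfold Spec_generate_pii_transformation_rules; infer_instance

-- ===== CLAIM (what is proved, stated in full; the proofs are below) =====
def Claim_equal_generate_pii_transformation_rules : Prop := ∀ (pii_fields : List String), Dom_generate_pii_transformation_rules pii_fields → Spec_generate_pii_transformation_rules pii_fields (generate_pii_transformation_rules pii_fields)

-- ===== LEMMAS AND PROOFS =====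

-- pvPriority's underlying association list, for unfolding lookups
theorem pvPriority_mk : pvPriority = PySem.Dict.mk
    [("email", 0), ("mail", 0),
     ("phone", 1), ("tel", 1), ("mobile", 1),
     ("ssn", 2), ("social", 2), ("id_number", 2),
     ("credit", 3), ("cc_", 3), ("card", 3),
     ("name", 4), ("fname", 4), ("lname", 4), ("first", 4), ("last", 4),
     ("address", 5), ("street", 5), ("location", 5)] := by decide

-- generic bounds for min-accumulating folds
theorem pv_foldl_le_init {α : Type} (F : Int → α → Int) (hdec : ∀ p x, F p x ≤ p)
    (l : List α) (a : Int) : l.foldl F a ≤ a := by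
  induction l generalizing a with
  | nil => simp
  | cons x xs ih => exact le_trans (ih _) (hdec a x)

theorem pv_foldl_le_of_mem {α : Type} (F : Int → α → Int) (B : Int) {x : α}
    (hdec : ∀ p y, F p y ≤ p) (hx' : ∀ p, F p x ≤ B) {l : List α} (hx : x ∈ l)
    (a : Int) : l.foldl F a ≤ B := by
  induction l generalizing a with
  | nil => cases hx
  | cons y ys ih =>
      rcases List.mem_cons.mp hx with rfl | h
      · exact le_trans (pv_foldl_le_init F hdec ys (F a x)) (hx' a)
      · exact ih h _

theorem pv_le_foldl {α : Type} (F : Int → α → Int) (c : Int)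
    {l : List α} (hstep : ∀ p x, x ∈ l → c ≤ p → c ≤ F p x) (a : Int) (ha : c ≤ a) :
    c ≤ l.foldl F a := by
  induction l generalizing a with
  | nil => simpa
  | cons y ys ih =>
      exact ih (fun p x hx => hstep p x (List.mem_cons_of_mem _ hx))
        _ (hstep a y List.mem_cons_self ha)

theorem pv_inner_le_init (fl : String) (i : Int) (p : Int) :
    pvLengths.foldl (fun p length =>
      min p (pvPriority.getD (PySem.Str.slice fl (some i) (some (i + length))) 6)) p ≤ p :=
  pv_foldl_le_init _ (fun _ _ => min_le_left _ _) _ _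

theorem pv_inner_le_mem (fl : String) (i : Int) (p : Int) {L : Int} (hL : L ∈ pvLengths) :
    pvLengths.foldl (fun p length =>
      min p (pvPriority.getD (PySem.Str.slice fl (some i) (some (i + length))) 6)) p ≤
      pvPriority.getD (PySem.Str.slice fl (some i) (some (i + L))) 6 :=
  pv_foldl_le_of_mem
    (fun p length => min p (pvPriority.getD (PySem.Str.slice fl (some i) (some (i + length))) 6))
    (pvPriority.getD (PySem.Str.slice fl (some i) (some (i + L))) 6)
    (fun _ _ => min_le_left _ _) (fun _ => min_le_right _ _) hL p

-- an assoc-list lookup either misses (default) or hits one of its entries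
theorem pv_dict_getD_mem {kappa nu : Type} [BEq kappa] [LawfulBEq kappa]
    (l : List (kappa × nu)) (k : kappa) (d : nu) :
    (PySem.Dict.mk l).getD k d = d ∨ (k, (PySem.Dict.mk l).getD k d) ∈ l := by
  induction l with
  | nil => left; simp [PySem.Dict.getD, PySem.Dict.get?]
  | cons x xs ih =>
      obtain ⟨a, b⟩ := x
      by_cases h : (a == k) = true
      · have hv : (PySem.Dict.mk ((a, b) :: xs)).getD k d = b := by
          simp [PySem.Dict.getD, PySem.Dict.get?_mk_cons, h]
        rw [hv]
        right
        simp [← eq_of_beq h]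
      · have hv : (PySem.Dict.mk ((a, b) :: xs)).getD k d = (PySem.Dict.mk xs).getD k d := by
          simp [PySem.Dict.getD, PySem.Dict.get?_mk_cons, h]
        rw [hv]
        rcases ih with h6 | hm
        · exact Or.inl h6
        · exact Or.inr (List.mem_cons_of_mem _ hm)

-- every priority the scan can see is 6 (miss) or the value of a real trigger entry
theorem pv_getD_mem (w : String) :
    pvPriority.getD w 6 = 6 ∨ (w, pvPriority.getD w 6) ∈
    [("email", (0:Int)), ("mail", 0),
     ("phone", 1), ("tel", 1), ("mobile", 1),
     ("ssn", 2), ("social", 2), ("id_number", 2),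
     ("credit", 3), ("cc_", 3), ("card", 3),
     ("name", 4), ("fname", 4), ("lname", 4), ("first", 4), ("last", 4),
     ("address", 5), ("street", 5), ("location", 5)] := by
  rw [pvPriority_mk]
  exact pv_dict_getD_mem _ w 6

-- every window the scan hashes is an infix of the field
theorem pv_slice_infix (fl : String) (i L : Int) (hi : 0 ≤ i) (hL : 0 ≤ L) :
    (PySem.Str.slice fl (some i) (some (i + L))).toList <:+: fl.toList := by
  rw [PySem.Str.toList_slice, PySem.Chars.slice_eq_listSlice,
    PySem.List.slice_toNat _ hi (by omega)]
  exact (List.take_prefix _ _).isInfix.trans (List.drop_suffix _ _).isInfix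

-- conversely, an occurring trigger is hit by some window of its own length
theorem pv_window_of_isIn (t fl : String) (ht : t.toList ≠ [])
    (h : PySem.Str.isIn t fl = true) :
    ∃ i : Int, 0 ≤ i ∧ i < (fl.toList.length : Int) ∧
      PySem.Str.slice fl (some i) (some (i + (t.toList.length : Int))) = t := by
  obtain ⟨a, b, hab⟩ := (PySem.Str.isIn_iff_infix t fl).mp h
  have hlen : fl.toList.length = a.length + t.toList.length + b.length := by
    rw [← hab]; simp; omega
  have htpos : 0 < t.toList.length := List.length_pos_iff.mpr ht
  refine ⟨(a.length : Int), by positivity, by omega, ?_⟩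
  apply String.toList_inj.mp
  rw [PySem.Str.toList_slice, PySem.Chars.slice_eq_listSlice, PySem.List.slice_natCast_add]
  rw [← hab, List.append_assoc, List.drop_left, List.take_left]

-- occurrence of a trigger bounds the scan by that trigger's priority
theorem pv_best_le (t fl : String) (ht : t.toList ≠ [])
    (hlen : ((t.toList.length : Int)) ∈ pvLengths)
    (h : PySem.Str.isIn t fl = true) : pvBestP fl ≤ pvPriority.getD t 6 := by
  obtain ⟨i, hi0, hilt, hslice⟩ := pv_window_of_isIn t fl ht h
  unfold pvBestP
  refine pv_foldl_le_of_mem _ _ (fun p i => pv_inner_le_init fl i p)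
    (fun p => ?_) (x := i) ?_ 6
  · have := pv_inner_le_mem fl i p hlen
    rwa [hslice] at this
  · rw [PySem.List.mem_pyRange_one, PySem.Str.len_eq]
    exact ⟨hi0, hilt⟩

-- lower bound: if every infix of the field scores at least c, so does the scan
theorem pv_best_ge (fl : String) (c : Int) (hc6 : c ≤ 6)
    (h : ∀ w : String, w.toList <:+: fl.toList → c ≤ pvPriority.getD w 6) :
    c ≤ pvBestP fl := by
  unfold pvBestP
  refine pv_le_foldl _ c (fun p i hi hp => ?_) 6 hc6
  refine pv_le_foldl _ c (fun q L hL hq => ?_) p hp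
  refine le_min hq (h _ (pv_slice_infix fl i L ?_ ?_))
  · exact (PySem.List.mem_pyRange_one.mp hi).1
  · simp only [pvLengths, List.mem_cons, List.not_mem_nil, or_false] at hL
    rcases hL with rfl|rfl|rfl|rfl|rfl|rfl|rfl <;> norm_num

-- the inverted-index scan picks exactly the priority A's if/elif chain picks
theorem pvBestP_eq (fl : String) : pvBestP fl =
    (if PySem.Str.isIn "email" fl || PySem.Str.isIn "mail" fl then 0
     else if PySem.Str.isIn "phone" fl || PySem.Str.isIn "tel" fl || PySem.Str.isIn "mobile" fl then 1
     else if PySem.Str.isIn "ssn" fl || PySem.Str.isIn "social" fl || PySem.Str.isIn "id_number" fl then 2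
     else if PySem.Str.isIn "credit" fl || PySem.Str.isIn "cc_" fl || PySem.Str.isIn "card" fl then 3
     else if PySem.Str.isIn "name" fl || PySem.Str.isIn "fname" fl || PySem.Str.isIn "lname" fl || PySem.Str.isIn "first" fl || PySem.Str.isIn "last" fl then 4
     else if PySem.Str.isIn "address" fl || PySem.Str.isIn "street" fl || PySem.Str.isIn "location" fl then 5
     else 6) := by
  have hub6 : pvBestP fl ≤ 6 := by
    unfold pvBestP
    exact pv_foldl_le_init _ (fun p i => pv_inner_le_init fl i p) _ 6
  split_ifs with h0 h1 h2 h3 h4 h5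
  · have hk := h0
    refine le_antisymm ?_ ?_
    · simp only [Bool.or_eq_true] at hk
      rcases hk with h|h
      · exact le_trans (pv_best_le "email" fl (by decide) (by decide) h) (by decide)
      · exact le_trans (pv_best_le "mail" fl (by decide) (by decide) h) (by decide)
    · refine pv_best_ge fl 0 (by norm_num) (fun w hinf => ?_)
      rcases pv_getD_mem w with h6 | hmem
      · rw [h6]; norm_num
      · simp only [List.mem_cons, List.not_mem_nil, or_false, Prod.mk.injEq] at hmem
        rcases hmem with ⟨rfl,hv⟩|⟨rfl,hv⟩|⟨rfl,hv⟩|⟨rfl,hv⟩|⟨rfl,hv⟩|⟨rfl,hv⟩|⟨rfl,hv⟩|⟨rfl,hv⟩|⟨rfl,hv⟩|⟨rfl,hv⟩|⟨rfl,hv⟩|⟨rfl,hv⟩|⟨rfl,hv⟩|⟨rfl,hv⟩|⟨rfl,hv⟩|⟨rfl,hv⟩|⟨rfl,hv⟩|⟨rfl,hv⟩|⟨rfl,hv⟩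
        · rw [hv]
        · rw [hv]
        · rw [hv]; norm_num
        · rw [hv]; norm_num
        · rw [hv]; norm_num
        · rw [hv]; norm_num
        · rw [hv]; norm_num
        · rw [hv]; norm_num
        · rw [hv]; norm_num
        · rw [hv]; norm_num
        · rw [hv]; norm_num
        · rw [hv]; norm_num
        · rw [hv]; norm_num
        · rw [hv]; norm_num
        · rw [hv]; norm_num
        · rw [hv]; norm_num
        · rw [hv]; norm_num
        · rw [hv]; norm_num
        · rw [hv]; norm_num
  · have hk := h1
    refine le_antisymm ?_ ?_
    · simp only [Bool.or_eq_true] at hk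
      rcases hk with (h|h)|h
      · exact le_trans (pv_best_le "phone" fl (by decide) (by decide) h) (by decide)
      · exact le_trans (pv_best_le "tel" fl (by decide) (by decide) h) (by decide)
      · exact le_trans (pv_best_le "mobile" fl (by decide) (by decide) h) (by decide)
    · refine pv_best_ge fl 1 (by norm_num) (fun w hinf => ?_)
      rcases pv_getD_mem w with h6 | hmem
      · rw [h6]; norm_num
      · simp only [Bool.or_eq_true, not_or, PySem.Str.isIn_iff_infix] at h0
        simp only [List.mem_cons, List.not_mem_nil, or_false, Prod.mk.injEq] at hmem
        rcases hmem with ⟨rfl,hv⟩|⟨rfl,hv⟩|⟨rfl,hv⟩|⟨rfl,hv⟩|⟨rfl,hv⟩|⟨rfl,hv⟩|⟨rfl,hv⟩|⟨rfl,hv⟩|⟨rfl,hv⟩|⟨rfl,hv⟩|⟨rfl,hv⟩|⟨rfl,hv⟩|⟨rfl,hv⟩|⟨rfl,hv⟩|⟨rfl,hv⟩|⟨rfl,hv⟩|⟨rfl,hv⟩|⟨rfl,hv⟩|⟨rfl,hv⟩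
        · exact absurd hinf h0.1
        · exact absurd hinf h0.2
        · rw [hv]
        · rw [hv]
        · rw [hv]
        · rw [hv]; norm_num
        · rw [hv]; norm_num
        · rw [hv]; norm_num
        · rw [hv]; norm_num
        · rw [hv]; norm_num
        · rw [hv]; norm_num
        · rw [hv]; norm_num
        · rw [hv]; norm_num
        · rw [hv]; norm_num
        · rw [hv]; norm_num
        · rw [hv]; norm_num
        · rw [hv]; norm_num
        · rw [hv]; norm_num
        · rw [hv]; norm_num
  · have hk := h2
    refine le_antisymm ?_ ?_
    · simp only [Bool.or_eq_true] at hk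
      rcases hk with (h|h)|h
      · exact le_trans (pv_best_le "ssn" fl (by decide) (by decide) h) (by decide)
      · exact le_trans (pv_best_le "social" fl (by decide) (by decide) h) (by decide)
      · exact le_trans (pv_best_le "id_number" fl (by decide) (by decide) h) (by decide)
    · refine pv_best_ge fl 2 (by norm_num) (fun w hinf => ?_)
      rcases pv_getD_mem w with h6 | hmem
      · rw [h6]; norm_num
      · simp only [Bool.or_eq_true, not_or, PySem.Str.isIn_iff_infix] at h0 h1
        simp only [List.mem_cons, List.not_mem_nil, or_false, Prod.mk.injEq] at hmem
        rcases hmem with ⟨rfl,hv⟩|⟨rfl,hv⟩|⟨rfl,hv⟩|⟨rfl,hv⟩|⟨rfl,hv⟩|⟨rfl,hv⟩|⟨rfl,hv⟩|⟨rfl,hv⟩|⟨rfl,hv⟩|⟨rfl,hv⟩|⟨rfl,hv⟩|⟨rfl,hv⟩|⟨rfl,hv⟩|⟨rfl,hv⟩|⟨rfl,hv⟩|⟨rfl,hv⟩|⟨rfl,hv⟩|⟨rfl,hv⟩|⟨rfl,hv⟩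
        · exact absurd hinf h0.1
        · exact absurd hinf h0.2
        · exact absurd hinf h1.1.1
        · exact absurd hinf h1.1.2
        · exact absurd hinf h1.2
        · rw [hv]
        · rw [hv]
        · rw [hv]
        · rw [hv]; norm_num
        · rw [hv]; norm_num
        · rw [hv]; norm_num
        · rw [hv]; norm_num
        · rw [hv]; norm_num
        · rw [hv]; norm_num
        · rw [hv]; norm_num
        · rw [hv]; norm_num
        · rw [hv]; norm_num
        · rw [hv]; norm_num
        · rw [hv]; norm_num
  · have hk := h3
    refine le_antisymm ?_ ?_
    · simp only [Bool.or_eq_true] at hk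
      rcases hk with (h|h)|h
      · exact le_trans (pv_best_le "credit" fl (by decide) (by decide) h) (by decide)
      · exact le_trans (pv_best_le "cc_" fl (by decide) (by decide) h) (by decide)
      · exact le_trans (pv_best_le "card" fl (by decide) (by decide) h) (by decide)
    · refine pv_best_ge fl 3 (by norm_num) (fun w hinf => ?_)
      rcases pv_getD_mem w with h6 | hmem
      · rw [h6]; norm_num
      · simp only [Bool.or_eq_true, not_or, PySem.Str.isIn_iff_infix] at h0 h1 h2
        simp only [List.mem_cons, List.not_mem_nil, or_false, Prod.mk.injEq] at hmem
        rcases hmem with ⟨rfl,hv⟩|⟨rfl,hv⟩|⟨rfl,hv⟩|⟨rfl,hv⟩|⟨rfl,hv⟩|⟨rfl,hv⟩|⟨rfl,hv⟩|⟨rfl,hv⟩|⟨rfl,hv⟩|⟨rfl,hv⟩|⟨rfl,hv⟩|⟨rfl,hv⟩|⟨rfl,hv⟩|⟨rfl,hv⟩|⟨rfl,hv⟩|⟨rfl,hv⟩|⟨rfl,hv⟩|⟨rfl,hv⟩|⟨rfl,hv⟩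
        · exact absurd hinf h0.1
        · exact absurd hinf h0.2
        · exact absurd hinf h1.1.1
        · exact absurd hinf h1.1.2
        · exact absurd hinf h1.2
        · exact absurd hinf h2.1.1
        · exact absurd hinf h2.1.2
        · exact absurd hinf h2.2
        · rw [hv]
        · rw [hv]
        · rw [hv]
        · rw [hv]; norm_num
        · rw [hv]; norm_num
        · rw [hv]; norm_num
        · rw [hv]; norm_num
        · rw [hv]; norm_num
        · rw [hv]; norm_num
        · rw [hv]; norm_num
        · rw [hv]; norm_num
  · have hk := h4
    refine le_antisymm ?_ ?_
    · simp only [Bool.or_eq_true] at hk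
      rcases hk with (((h|h)|h)|h)|h
      · exact le_trans (pv_best_le "name" fl (by decide) (by decide) h) (by decide)
      · exact le_trans (pv_best_le "fname" fl (by decide) (by decide) h) (by decide)
      · exact le_trans (pv_best_le "lname" fl (by decide) (by decide) h) (by decide)
      · exact le_trans (pv_best_le "first" fl (by decide) (by decide) h) (by decide)
      · exact le_trans (pv_best_le "last" fl (by decide) (by decide) h) (by decide)
    · refine pv_best_ge fl 4 (by norm_num) (fun w hinf => ?_)
      rcases pv_getD_mem w with h6 | hmem
      · rw [h6]; norm_num
      · simp only [Bool.or_eq_true, not_or, PySem.Str.isIn_iff_infix] at h0 h1 h2 h3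
        simp only [List.mem_cons, List.not_mem_nil, or_false, Prod.mk.injEq] at hmem
        rcases hmem with ⟨rfl,hv⟩|⟨rfl,hv⟩|⟨rfl,hv⟩|⟨rfl,hv⟩|⟨rfl,hv⟩|⟨rfl,hv⟩|⟨rfl,hv⟩|⟨rfl,hv⟩|⟨rfl,hv⟩|⟨rfl,hv⟩|⟨rfl,hv⟩|⟨rfl,hv⟩|⟨rfl,hv⟩|⟨rfl,hv⟩|⟨rfl,hv⟩|⟨rfl,hv⟩|⟨rfl,hv⟩|⟨rfl,hv⟩|⟨rfl,hv⟩
        · exact absurd hinf h0.1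
        · exact absurd hinf h0.2
        · exact absurd hinf h1.1.1
        · exact absurd hinf h1.1.2
        · exact absurd hinf h1.2
        · exact absurd hinf h2.1.1
        · exact absurd hinf h2.1.2
        · exact absurd hinf h2.2
        · exact absurd hinf h3.1.1
        · exact absurd hinf h3.1.2
        · exact absurd hinf h3.2
        · rw [hv]
        · rw [hv]
        · rw [hv]
        · rw [hv]
        · rw [hv]
        · rw [hv]; norm_num
        · rw [hv]; norm_num
        · rw [hv]; norm_num
  · have hk := h5
    refine le_antisymm ?_ ?_
    · simp only [Bool.or_eq_true] at hk
      rcases hk with (h|h)|h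
      · exact le_trans (pv_best_le "address" fl (by decide) (by decide) h) (by decide)
      · exact le_trans (pv_best_le "street" fl (by decide) (by decide) h) (by decide)
      · exact le_trans (pv_best_le "location" fl (by decide) (by decide) h) (by decide)
    · refine pv_best_ge fl 5 (by norm_num) (fun w hinf => ?_)
      rcases pv_getD_mem w with h6 | hmem
      · rw [h6]; norm_num
      · simp only [Bool.or_eq_true, not_or, PySem.Str.isIn_iff_infix] at h0 h1 h2 h3 h4
        simp only [List.mem_cons, List.not_mem_nil, or_false, Prod.mk.injEq] at hmem
        rcases hmem with ⟨rfl,hv⟩|⟨rfl,hv⟩|⟨rfl,hv⟩|⟨rfl,hv⟩|⟨rfl,hv⟩|⟨rfl,hv⟩|⟨rfl,hv⟩|⟨rfl,hv⟩|⟨rfl,hv⟩|⟨rfl,hv⟩|⟨rfl,hv⟩|⟨rfl,hv⟩|⟨rfl,hv⟩|⟨rfl,hv⟩|⟨rfl,hv⟩|⟨rfl,hv⟩|⟨rfl,hv⟩|⟨rfl,hv⟩|⟨rfl,hv⟩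
        · exact absurd hinf h0.1
        · exact absurd hinf h0.2
        · exact absurd hinf h1.1.1
        · exact absurd hinf h1.1.2
        · exact absurd hinf h1.2
        · exact absurd hinf h2.1.1
        · exact absurd hinf h2.1.2
        · exact absurd hinf h2.2
        · exact absurd hinf h3.1.1
        · exact absurd hinf h3.1.2
        · exact absurd hinf h3.2
        · exact absurd hinf h4.1.1.1.1
        · exact absurd hinf h4.1.1.1.2
        · exact absurd hinf h4.1.1.2
        · exact absurd hinf h4.1.2
        · exact absurd hinf h4.2
        · rw [hv]
        · rw [hv]
        · rw [hv]
  · refine le_antisymm hub6 ?_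
    refine pv_best_ge fl 6 (by norm_num) (fun w hinf => ?_)
    rcases pv_getD_mem w with h6 | hmem
    · rw [h6]
    · simp only [Bool.or_eq_true, not_or, PySem.Str.isIn_iff_infix] at h0 h1 h2 h3 h4 h5
      simp only [List.mem_cons, List.not_mem_nil, or_false, Prod.mk.injEq] at hmem
      rcases hmem with ⟨rfl,hv⟩|⟨rfl,hv⟩|⟨rfl,hv⟩|⟨rfl,hv⟩|⟨rfl,hv⟩|⟨rfl,hv⟩|⟨rfl,hv⟩|⟨rfl,hv⟩|⟨rfl,hv⟩|⟨rfl,hv⟩|⟨rfl,hv⟩|⟨rfl,hv⟩|⟨rfl,hv⟩|⟨rfl,hv⟩|⟨rfl,hv⟩|⟨rfl,hv⟩|⟨rfl,hv⟩|⟨rfl,hv⟩|⟨rfl,hv⟩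
      · exact absurd hinf h0.1
      · exact absurd hinf h0.2
      · exact absurd hinf h1.1.1
      · exact absurd hinf h1.1.2
      · exact absurd hinf h1.2
      · exact absurd hinf h2.1.1
      · exact absurd hinf h2.1.2
      · exact absurd hinf h2.2
      · exact absurd hinf h3.1.1
      · exact absurd hinf h3.1.2
      · exact absurd hinf h3.2
      · exact absurd hinf h4.1.1.1.1
      · exact absurd hinf h4.1.1.1.2
      · exact absurd hinf h4.1.1.2
      · exact absurd hinf h4.1.2
      · exact absurd hinf h4.2
      · exact absurd hinf h5.1.1
      · exact absurd hinf h5.1.2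
      · exact absurd hinf h5.2

-- one step of A's loop appends exactly the rule string B builds for that field
theorem pv_step (acc : List String) (field : String) :
    (
    let field_lower := PySem.Str.lower field
    if PySem.Str.isIn "email" field_lower || PySem.Str.isIn "mail" field_lower then
      acc ++ ["df['" ++ field ++ "'] = df['" ++ field ++ "'].apply(lambda x: mask_email(x))"]
    else if PySem.Str.isIn "phone" field_lower || PySem.Str.isIn "tel" field_lower || PySem.Str.isIn "mobile" field_lower then
      acc ++ ["df['" ++ field ++ "'] = df['" ++ field ++ "'].apply(lambda x: mask_phone(x))"]
    else if PySem.Str.isIn "ssn" field_lower || PySem.Str.isIn "social" field_lower || PySem.Str.isIn "id_number" field_lower then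
      acc ++ ["df['" ++ field ++ "'] = df['" ++ field ++ "'].apply(lambda x: mask_ssn(x))"]
    else if PySem.Str.isIn "credit" field_lower || PySem.Str.isIn "cc_" field_lower || PySem.Str.isIn "card" field_lower then
      acc ++ ["df['" ++ field ++ "'] = df['" ++ field ++ "'].apply(lambda x: mask_credit_card(x))"]
    else if PySem.Str.isIn "name" field_lower || PySem.Str.isIn "fname" field_lower || PySem.Str.isIn "lname" field_lower || PySem.Str.isIn "first" field_lower || PySem.Str.isIn "last" field_lower then
      acc ++ ["df['" ++ field ++ "'] = df['" ++ field ++ "'].apply(lambda x: hash_name(x))"]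
    else if PySem.Str.isIn "address" field_lower || PySem.Str.isIn "street" field_lower || PySem.Str.isIn "location" field_lower then
      acc ++ ["df['" ++ field ++ "'] = df['" ++ field ++ "'].apply(lambda x: remove_address(x))"]
    else
      acc ++ ["df['" ++ field ++ "'] = df['" ++ field ++ "'].apply(lambda x: hash_name(x))"]) =
    acc ++ ["df['" ++ field ++ "'] = df['" ++ field ++ "'].apply(lambda x: " ++
      (PySem.List.pyGetD pvMasks (pvBestP (PySem.Str.lower field)) "" ++ "(x))")] := by
  simp only [pvBestP_eq]
  split_ifs <;> simp only [String.append_assoc] <;> rfl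

theorem pv_foldl_eq (xs : List String) (acc : List String) :
    xs.foldl (fun rules field =>
    let field_lower := PySem.Str.lower field
    if PySem.Str.isIn "email" field_lower || PySem.Str.isIn "mail" field_lower then
      rules ++ ["df['" ++ field ++ "'] = df['" ++ field ++ "'].apply(lambda x: mask_email(x))"]
    else if PySem.Str.isIn "phone" field_lower || PySem.Str.isIn "tel" field_lower || PySem.Str.isIn "mobile" field_lower then
      rules ++ ["df['" ++ field ++ "'] = df['" ++ field ++ "'].apply(lambda x: mask_phone(x))"]
    else if PySem.Str.isIn "ssn" field_lower || PySem.Str.isIn "social" field_lower || PySem.Str.isIn "id_number" field_lower then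
      rules ++ ["df['" ++ field ++ "'] = df['" ++ field ++ "'].apply(lambda x: mask_ssn(x))"]
    else if PySem.Str.isIn "credit" field_lower || PySem.Str.isIn "cc_" field_lower || PySem.Str.isIn "card" field_lower then
      rules ++ ["df['" ++ field ++ "'] = df['" ++ field ++ "'].apply(lambda x: mask_credit_card(x))"]
    else if PySem.Str.isIn "name" field_lower || PySem.Str.isIn "fname" field_lower || PySem.Str.isIn "lname" field_lower || PySem.Str.isIn "first" field_lower || PySem.Str.isIn "last" field_lower then
      rules ++ ["df['" ++ field ++ "'] = df['" ++ field ++ "'].apply(lambda x: hash_name(x))"]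
    else if PySem.Str.isIn "address" field_lower || PySem.Str.isIn "street" field_lower || PySem.Str.isIn "location" field_lower then
      rules ++ ["df['" ++ field ++ "'] = df['" ++ field ++ "'].apply(lambda x: remove_address(x))"]
    else
      rules ++ ["df['" ++ field ++ "'] = df['" ++ field ++ "'].apply(lambda x: hash_name(x))"]) acc =
    acc ++ generate_pii_transformation_rules_alt xs := by
  induction xs generalizing acc with
  | nil => simp [generate_pii_transformation_rules_alt]
  | cons x xs ih =>
      rw [List.foldl_cons, pv_step, ih]
      simp [generate_pii_transformation_rules_alt]

-- ===== VERDICT (by name: the statement is the Claim_ definition above) =====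
theorem generate_pii_transformation_rules_spec : Claim_equal_generate_pii_transformation_rules := by
  intro pii_fields _
  show generate_pii_transformation_rules pii_fields = generate_pii_transformation_rules_alt pii_fields
  unfold generate_pii_transformation_rules
  rw [pv_foldl_eq, List.nil_append]
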